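-- pv_equiv track=rewrite | github.com/shintaro1993/atcoder | problem011-020/019_c.py | lillian
-- ===== SOURCE A (Python) =====
-- def lillian(arr):
--     arr_set = set(arr)
--     for elem in arr:
--         divisible = []
--         while elem % 2 == 0:
--             elem //= 2
--             divisible.append(elem)
--
--         arr_set.difference_update(set(divisible))
--
--     return len(arr_set)
-- ===== SOURCE B (Python) =====
-- def lillian(arr):
--     s = set(arr)
--     m = 0
--     for x in s:
--         if abs(x) > m:
--             m = abs(x)
--     count = 0
--     for v in s:
--         d = 2 * v
--         good = True
--         while abs(d) <= m:
--             if d in s: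
--                 good = False
--                 break
--             d *= 2
--         if good:
--             count += 1
--     return count
-- ===== Notes on version B (the rewrite author's own statement) =====
-- stated objective: alternative
-- what changed: A deletes from the set every downward-halving descendant of each element; B instead tests each distinct value upward (v*2, v*4, ... bounded by the maximum absolute value) for membership and counts the survivors directly, never mutating a set.
-- outside the precondition, e.g. on lillian([0]): A does not finish within the time limit, B returns 0
import Mathlib
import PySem

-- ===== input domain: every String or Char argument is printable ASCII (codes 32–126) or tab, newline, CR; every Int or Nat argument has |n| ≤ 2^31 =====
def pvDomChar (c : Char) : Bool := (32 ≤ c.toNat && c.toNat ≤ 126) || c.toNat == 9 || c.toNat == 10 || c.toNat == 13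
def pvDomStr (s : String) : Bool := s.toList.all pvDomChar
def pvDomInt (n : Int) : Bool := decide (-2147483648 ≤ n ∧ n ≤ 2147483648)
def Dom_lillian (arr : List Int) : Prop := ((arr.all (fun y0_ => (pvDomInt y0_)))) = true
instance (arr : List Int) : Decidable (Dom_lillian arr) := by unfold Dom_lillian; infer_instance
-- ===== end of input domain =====

-- B replaces A's downward halving-and-deletion with an upward bounded doubling membership
-- test, counting the surviving set elements directly (objective: alternative, same cost).

-- ===== PORT A =====
-- the 'while elem % 2 == 0' collection loop of A, with a fuel counter as totality guard:
-- fuel elem.natAbs is enough for every elem ≠ 0 (the Python loop diverges on elem = 0;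
-- such inputs are excluded by Pre_lillian)
def pvHalvesGo (fuel : Nat) (elem : Int) : List Int :=
  match fuel with
  | 0 => []
  | fuel + 1 =>
    if PySem.Int.mod elem 2 = 0 then
      let e := PySem.Int.floordiv elem 2
      e :: pvHalvesGo fuel e
    else []

def pvHalves (elem : Int) : List Int := pvHalvesGo elem.natAbs elem

def lillian (arr : List Int) : Int :=
  let final := arr.foldl
    (fun s elem => PySem.Set.diff s (PySem.Set.ofList (pvHalves elem)))
    (PySem.Set.ofList arr)
  PySem.Set.len final

-- ===== PORT B =====
-- the 'while abs(d) <= m' loop of B, with a fuel counter as totality guard: the fuel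
-- chosen in pvNoDouble is enough for every d ≠ 0 (d = 2*v with v ∈ s forces d ≠ 0
-- whenever 0 ∉ arr, which Pre_lillian guarantees)
def pvNoDoubleGo (s : List Int) (m : Int) (fuel : Nat) (d : Int) : Bool :=
  match fuel with
  | 0 => true
  | fuel + 1 =>
    if (d.natAbs : Int) ≤ m then
      if PySem.Set.contains s d then false
      else pvNoDoubleGo s m fuel (2 * d)
    else true

def pvNoDouble (s : List Int) (m : Int) (d : Int) : Bool :=
  pvNoDoubleGo s m ((m + 1 - (d.natAbs : Int)).toNat + 1) d

def lillian_alt (arr : List Int) : Int :=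
  let s : PySem.Set Int := PySem.Set.ofList arr
  let m : Int := s.foldl (fun m x => if (x.natAbs : Int) > m then (x.natAbs : Int) else m) 0
  s.foldl (fun c v => if pvNoDouble s m (2 * v) then c + 1 else c) (0 : Int)

-- ===== PRECONDITION & SPEC =====
-- Pre_ excludes arrays containing 0: there A's halving loop never terminates (0 // 2 == 0),
-- so A returns no value, while B returns normally.
def Pre_lillian (arr : List Int) : Prop := (0 : Int) ∉ arr
instance (arr : List Int) : Decidable (Pre_lillian arr) := by unfold Pre_lillian; infer_instance
def pvWitness_lillian : List Int := [1, 2, 3]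
def Spec_lillian (arr : List Int) (out : Int) : Prop := out = lillian_alt arr
instance (arr : List Int) (out : Int) : Decidable (Spec_lillian arr out) := by unfold Spec_lillian; infer_instance

-- ===== CLAIM (what is proved, stated in full; the proofs are below) =====
def Claim_equal_lillian : Prop := ∀ (arr : List Int), Dom_lillian arr → Pre_lillian arr → Spec_lillian arr (lillian arr)

-- ===== LEMMAS AND PROOFS =====

-- membership in A's halving chain: v ∈ pvHalves e ↔ e = v · 2^(k+1) for some k
theorem pv_mem_halvesGo (v : Int) : ∀ (fuel : Nat) (e : Int), e ≠ 0 → e.natAbs ≤ fuel →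
    (v ∈ pvHalvesGo fuel e ↔ ∃ k : ℕ, e = v * 2 ^ (k + 1)) := by
  intro fuel
  induction fuel with
  | zero => intro e he hf; omega
  | succ fuel ih =>
    intro e he hf
    rw [pvHalvesGo]
    by_cases hmod : PySem.Int.mod e 2 = 0
    · simp only [if_pos hmod]
      rw [PySem.Int.mod_eq_emod_of_pos (by norm_num)] at hmod
      set E := PySem.Int.floordiv e 2 with hEdef
      have hE : E = e / 2 := by
        rw [hEdef, PySem.Int.floordiv_eq_ediv_of_pos (by norm_num : (0:Int) < 2)]
      have h2 : e = 2 * E := by omega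
      have hE0 : E ≠ 0 := by omega
      have hEf : E.natAbs ≤ fuel := by
        have h22 : e.natAbs = 2 * E.natAbs := by rw [h2, Int.natAbs_mul]; norm_num
        omega
      rw [List.mem_cons, ih E hE0 hEf]
      constructor
      · rintro (hv | ⟨k, hk⟩)
        · exact ⟨0, by rw [h2, hv]; ring⟩
        · exact ⟨k + 1, by rw [h2, hk]; ring⟩
      · rintro ⟨k, hk⟩
        cases k with
        | zero =>
          left
          have : e = v * 2 := by simpa using hk
          omega
        | succ k' =>
          right
          refine ⟨k', ?_⟩
          have : e = (v * 2 ^ (k' + 1)) * 2 := by rw [hk]; ring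
          omega
    · simp only [if_neg hmod]
      rw [PySem.Int.mod_eq_emod_of_pos (by norm_num)] at hmod
      simp only [List.not_mem_nil, false_iff, not_exists]
      intro k hk
      apply hmod
      have : e = (v * 2 ^ k) * 2 := by rw [hk]; ring
      omega

theorem pv_mem_halves (v e : Int) (he : e ≠ 0) :
    v ∈ pvHalves e ↔ ∃ k : ℕ, e = v * 2 ^ (k + 1) :=
  pv_mem_halvesGo v e.natAbs e he le_rfl

-- B's max loop dominates its initial value and bounds every element of the list
theorem pv_foldMax_mono (s : List Int) : ∀ init : Int,
    init ≤ s.foldl (fun m x => if (x.natAbs : Int) > m then (x.natAbs : Int) else m) init := by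
  induction s with
  | nil => simp
  | cons a l ih =>
    intro init
    simp only [List.foldl_cons]
    exact le_trans (by split <;> omega) (ih _)

theorem pv_foldMax_bound (s : List Int) (init x : Int) (hx : x ∈ s) :
    (x.natAbs : Int) ≤ s.foldl (fun m x => if (x.natAbs : Int) > m then (x.natAbs : Int) else m) init := by
  induction s generalizing init x with
  | nil => simp at hx
  | cons a l ih =>
    simp only [List.foldl_cons]
    rcases List.mem_cons.mp hx with rfl | hx
    · exact le_trans (by split <;> omega) (pv_foldMax_mono l _)
    · exact ih _ _ hx

-- characterisation of B's doubling loop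
theorem pv_noDoubleGo_iff (s : List Int) (m : Int) : ∀ (fuel : Nat) (d : Int), d ≠ 0 →
    (m + 1 - (d.natAbs : Int)).toNat < fuel →
    (∀ x ∈ s, (x.natAbs : Int) ≤ m) →
    (pvNoDoubleGo s m fuel d = true ↔ ∀ j : ℕ, d * 2 ^ j ∉ s) := by
  intro fuel
  induction fuel with
  | zero => intro d hd hf hb; omega
  | succ fuel ih =>
    intro d hd hf hb
    rw [pvNoDoubleGo]
    by_cases hle : (d.natAbs : Int) ≤ m
    · simp only [if_pos hle]
      by_cases hc : PySem.Set.contains s d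
      · simp only [if_pos hc]
        constructor
        · intro h; exact absurd h (by simp)
        · intro h
          exact absurd ((PySem.Set.contains_iff ..).mp hc) (by simpa using h 0)
      · simp only [if_neg hc]
        have hd2 : (2 * d) ≠ 0 := by omega
        have hf2 : (m + 1 - ((2 * d).natAbs : Int)).toNat < fuel := by
          have : (2 * d).natAbs = 2 * d.natAbs := by simp [Int.natAbs_mul]
          omega
        rw [ih (2 * d) hd2 hf2 hb]
        have hds : d ∉ s := fun h => hc ((PySem.Set.contains_iff ..).mpr h)
        constructor
        · intro h j
          cases j with
          | zero => simpa using hds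
          | succ j' =>
            have he : d * 2 ^ (j' + 1) = 2 * d * 2 ^ j' := by ring
            rw [he]; exact h j'
        · intro h j
          have he : 2 * d * 2 ^ j = d * 2 ^ (j + 1) := by ring
          rw [he]; exact h (j + 1)
    · simp only [if_neg hle, true_iff]
      intro j hmem
      have h1 := hb _ hmem
      have h2 : (d * 2 ^ j).natAbs = d.natAbs * 2 ^ j := by
        simp [Int.natAbs_mul, Int.natAbs_pow]
      have h3 : d.natAbs ≤ d.natAbs * 2 ^ j :=
        Nat.le_mul_of_pos_right _ (Nat.pow_pos (by norm_num))
      rw [h2] at h1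
      push_cast at h1 h3 hle
      linarith

theorem pv_noDouble_iff (s : List Int) (m d : Int) (hd : d ≠ 0)
    (hb : ∀ x ∈ s, (x.natAbs : Int) ≤ m) :
    pvNoDouble s m d = true ↔ ∀ j : ℕ, d * 2 ^ j ∉ s :=
  pv_noDoubleGo_iff s m _ d hd (by omega) hb

-- A's fold of set-differences is one filter
theorem pv_foldl_diff (l : List Int) : ∀ S : List Int,
    l.foldl (fun s elem => PySem.Set.diff s (PySem.Set.ofList (pvHalves elem))) S
      = S.filter (fun v => decide (∀ e ∈ l, v ∉ pvHalves e)) := by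
  induction l with
  | nil => intro S; simp
  | cons a t ih =>
    intro S
    simp only [List.foldl_cons]
    rw [ih]
    show (S.filter (fun x => !(PySem.Set.contains (PySem.Set.ofList (pvHalves a)) x))).filter _ = _
    rw [List.filter_filter]
    apply List.filter_congr
    intro v hv
    by_cases hA : v ∈ pvHalves a <;> by_cases hB : (∀ e ∈ t, v ∉ pvHalves e) <;>
      simp [hA, hB, PySem.Set.mem_ofList]

-- B's counting fold is countP
theorem pv_foldl_count (p : Int → Bool) (s : List Int) : ∀ (c : Int),
    s.foldl (fun c v => if p v then c + 1 else c) c = c + (s.countP p : Int) := by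
  induction s with
  | nil => intro c; simp
  | cons a t ih =>
    intro c
    simp only [List.foldl_cons, List.countP_cons]
    rw [ih]
    split <;> rename_i h <;> simp [h] <;> push_cast <;> ring

-- pointwise agreement of the two kept/removed tests, and the final assembly
theorem pv_pointwise (arr : List Int) (h0 : (0:Int) ∉ arr) (v : Int)
    (hv : v ∈ PySem.Set.ofList arr) :
    decide (∀ e ∈ arr, v ∉ pvHalves e)
      = pvNoDouble (PySem.Set.ofList arr)
          ((PySem.Set.ofList arr).foldl (fun m x => if (x.natAbs : Int) > m then (x.natAbs : Int) else m) 0)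
          (2 * v) := by
  set S := PySem.Set.ofList arr with hS
  set m := S.foldl (fun m x => if (x.natAbs : Int) > m then (x.natAbs : Int) else m) 0 with hm
  have hva : v ∈ arr := (PySem.Set.mem_ofList ..).mp hv
  have hv0 : v ≠ 0 := fun h => h0 (h ▸ hva)
  rw [Bool.eq_iff_iff, decide_eq_true_iff]
  rw [pv_noDouble_iff S m (2 * v) (by omega) (fun x hx => pv_foldMax_bound S 0 x hx)]
  constructor
  · intro h j hmem
    have he : 2 * v * 2 ^ j = v * 2 ^ (j + 1) := by ring
    rw [he] at hmem
    have hj := (PySem.Set.mem_ofList ..).mp hmem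
    exact h _ hj ((pv_mem_halves v _ (fun hz => h0 (hz ▸ hj))).mpr ⟨j, rfl⟩)
  · intro h e he hmem
    have he0 : e ≠ 0 := fun hz => h0 (hz ▸ he)
    obtain ⟨k, rfl⟩ := (pv_mem_halves v e he0).mp hmem
    have heq : v * 2 ^ (k + 1) = 2 * v * 2 ^ k := by ring
    exact h k (by rw [← heq]; exact (PySem.Set.mem_ofList ..).mpr he)

-- ===== VERDICT (by name: the statement is the Claim_ definition above) =====
theorem lillian_spec : Claim_equal_lillian := by
  intro arr _ hpre
  unfold Spec_lillian lillian lillian_alt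
  rw [pv_foldl_diff, pv_foldl_count]
  show ((List.filter _ _).length : Int) = _
  rw [← List.countP_eq_length_filter]
  rw [List.countP_congr (fun v hv => by rw [pv_pointwise arr hpre v hv])]
  omega
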